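-- pv_equiv track=rewrite | github.com/git-arth/skincare.ai | SkinCareAI-main/challenge.py | categorize_products
-- ===== SOURCE A (Python) =====
-- def categorize_products(products):
--     categories = {}
--     for product in products:
--         category = product['product_type'].capitalize()
--         if category not in categories:
--             categories[category] = []
--         categories[category].append(product)
--     return categories
-- ===== SOURCE B (Python) =====
-- def categorize_products(products):
--     key = lambda p: p['product_type'].capitalize()
--     keys = list(dict.fromkeys(key(p) for p in products))
--     return {k: [p for p in products if key(p) == k] for k in keys}
-- ===== Notes on version B (the rewrite author's own statement) =====
-- stated objective: alternative
-- what changed: B makes two passes -- it first collects the distinct capitalized product types in order of first appearance (dict.fromkeys) and then builds each group by filtering the product list per key -- instead of A's single pass appending into mutable dict buckets.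
import Mathlib
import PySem

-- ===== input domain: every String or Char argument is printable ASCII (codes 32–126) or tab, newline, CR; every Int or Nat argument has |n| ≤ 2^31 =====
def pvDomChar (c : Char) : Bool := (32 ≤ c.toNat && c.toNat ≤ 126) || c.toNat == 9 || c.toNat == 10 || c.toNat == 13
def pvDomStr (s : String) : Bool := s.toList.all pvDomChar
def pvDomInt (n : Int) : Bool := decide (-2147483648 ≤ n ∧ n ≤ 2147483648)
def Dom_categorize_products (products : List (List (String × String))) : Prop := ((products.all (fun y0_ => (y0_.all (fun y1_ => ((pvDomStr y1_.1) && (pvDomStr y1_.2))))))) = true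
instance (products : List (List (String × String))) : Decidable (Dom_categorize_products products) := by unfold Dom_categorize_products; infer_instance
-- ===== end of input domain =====

-- B groups by distinct capitalized keys + one filter per key (two passes) instead of A's
-- single pass appending into mutable dict buckets; same return value, alternative structure.

-- shared helper: Python str.capitalize() — first char uppercased, the rest lowercased (exact on ASCII)
def pyCapitalize (s : String) : String :=
  match s.toList with
  | [] => ""
  | c :: rest => String.ofList (PySem.Chars.upperChar c :: PySem.Chars.lower rest)

-- shared helper: product['product_type'].capitalize(); the .getD "" is unreachable inside
-- Pre_ (in Python a missing key is a KeyError, excluded by Pre_)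
def pvKeyOf (p : List (String × String)) : String :=
  pyCapitalize (((PySem.Dict.mk p).get? "product_type").getD "")

-- ===== PORT A =====
def categorize_products (products : List (List (String × String))) : List (String × List (List (String × String))) :=
  (products.foldl
    (fun (categories : PySem.Dict String (List (List (String × String)))) product =>
      let category := pvKeyOf product
      let categories := if categories.contains category then categories
                        else categories.insert category []
      categories.insert category (categories.getD category [] ++ [product]))
    PySem.Dict.empty).items

-- ===== PORT B =====
def categorize_products_alt (products : List (List (String × String))) : List (String × List (List (String × String))) :=
  let keys := PySem.List.dedup (products.map pvKeyOf)
  keys.map (fun k => (k, products.filter (fun p => pvKeyOf p == k)))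

-- ===== PRECONDITION & SPEC =====
-- Pre_: every product dict has the key 'product_type' (otherwise Python A raises KeyError)
def Pre_categorize_products (products : List (List (String × String))) : Prop :=
  ∀ p ∈ products, (PySem.Dict.mk p).contains "product_type" = true
instance (products : List (List (String × String))) : Decidable (Pre_categorize_products products) := by unfold Pre_categorize_products; infer_instance
def pvWitness_categorize_products : (List (List (String × String))) :=
  [[("product_type", "serum"), ("name", "x")], [("product_type", "SERUM")], [("product_type", "mask")]]

def Spec_categorize_products (products : List (List (String × String))) (out : List (String × List (List (String × String)))) : Prop := out = categorize_products_alt products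
instance (products : List (List (String × String))) (out : List (String × List (List (String × String)))) : Decidable (Spec_categorize_products products out) := by unfold Spec_categorize_products; infer_instance

-- ===== CLAIM (what is proved, stated in full; the proofs are below) =====
def Claim_equal_categorize_products : Prop := ∀ (products : List (List (String × String))), Dom_categorize_products products → Pre_categorize_products products → Spec_categorize_products products (categorize_products products)

-- ===== LEMMAS AND PROOFS =====

-- A's loop body ("if missing then seed with []; then append") is d[k] = d.get(k,[]) + [p], i.e. modify
theorem pvStep_eq_modify (d : PySem.Dict String (List (List (String × String))))
    (c : String) (p : List (String × String)) :
    (let d1 := if d.contains c then d else d.insert c []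
     d1.insert c (d1.getD c [] ++ [p])) = d.modify c [] (· ++ [p]) := by
  by_cases h : d.contains c = true
  · simp [h, PySem.Dict.modify]
  · simp only [Bool.not_eq_true] at h
    simp [h, PySem.Dict.modify, PySem.Dict.getD_insert_self, PySem.Dict.getD_of_not_contains d _ h,
      PySem.Dict.insert_insert_self]

theorem pvFold_eq_modify (products : List (List (String × String))) :
    categorize_products products =
      (products.foldl (fun d p => d.modify (pvKeyOf p) [] (· ++ [p])) PySem.Dict.empty).items := by
  unfold categorize_products
  congr 1
  exact PySem.List.foldl_congr_mem _ _ _ _ (fun d p _ => pvStep_eq_modify d (pvKeyOf p) p)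

-- ===== VERDICT (by name: the statement is the Claim_ definition above) =====
theorem categorize_products_spec : Claim_equal_categorize_products := by
  intro products _ _
  show categorize_products products = categorize_products_alt products
  rw [pvFold_eq_modify]
  set d := products.foldl (fun d p => d.modify (pvKeyOf p) [] (· ++ [p])) PySem.Dict.empty with hd
  have hkeys : d.keys = PySem.Set.ofList (products.map pvKeyOf) := by
    rw [hd, PySem.Dict.keys_foldl_modify_key]
    simp [PySem.Set.update_nil_left]
  have hnd : d.keys.Nodup := by
    rw [hkeys]; exact PySem.Set.nodup_ofList _
  have hget : ∀ k, d.getD k [] = products.filter (fun p => pvKeyOf p == k) := by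
    intro k
    have : d = (products.map (fun p => (pvKeyOf p, p))).foldl
        (fun d q => d.modify q.1 [] (· ++ [q.2])) PySem.Dict.empty := by
      rw [hd, List.foldl_map]
    rw [this, PySem.Dict.getD_foldl_modify_append]
    simp [List.filter_map, Function.comp_def]
  rw [PySem.Dict.items_eq_map_keys d hnd [], hkeys]
  unfold categorize_products_alt
  simp only [PySem.List.dedup_eq_ofList]
  exact List.map_congr_left (fun k _ => by rw [hget k])
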